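-- pv_equiv track=rewrite | github.com/GregDMeyer/mult_cost_estimation | estimate_costs.py | compute_sum_size
-- ===== SOURCE A (Python) =====
-- def compute_sum_size(wl, inv, k, top_reg_size, reg_size):
--     '''
--     compute how many overflow bits will occur in the sum
--     '''
--     coeffs = [abs(wl)**i for i in range(k)]
--     if inv:  # largest coeff is on smallest register
--         coeffs = coeffs[::-1]
--
--     reg_values = [2**reg_size - 1]*(k-1) + [2**top_reg_size - 1]
--
--     if wl < 0:
--         # if wl is negative, the result is maximized when either the even or odd values are maximized
--         max_val = max(
--             sum(c*x for i, (c, x) in enumerate(zip(coeffs, reg_values)) if i%2 == 0),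
--             sum(c*x for i, (c, x) in enumerate(zip(coeffs, reg_values)) if i%2 == 1)
--         )
--     else:
--         # otherwise it's just when everything is maximum
--         max_val = sum(c*x for c, x in zip(coeffs, reg_values))
--
--     return max_val.bit_length()
-- ===== SOURCE B (Python) =====
-- def compute_sum_size(wl, inv, k, top_reg_size, reg_size):
--     '''
--     compute how many overflow bits will occur in the sum
--     '''
--     if k <= 0:
--         return 0
--     a = abs(wl)
--     R = 2**reg_size - 1
--     T = 2**top_reg_size - 1
--     # register values listed in increasing order of their weight a**j
--     vals = [T] + [R] * (k - 1) if inv else [R] * (k - 1) + [T]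
--     # Horner evaluation with a parity swap: no power is ever computed.
--     # After the loop p = sum of a**j * vals[j] over even j, q = over odd j.
--     p = q = 0
--     for v in reversed(vals):
--         p, q = v + a * q, a * p
--     max_val = max(p, q) if wl < 0 else p + q
--     return max_val.bit_length()
-- ===== Notes on version B (the rewrite author's own statement) =====
-- stated objective: faster
-- what changed: B evaluates the weighted sum by a Horner scheme with a parity swap (state (p,q) -> (v + a*q, a*p) over the register values in decreasing weight order), so no power a**i, coefficient list, reversal, zip or enumerate/filter pass of A remains.
-- outside the precondition, e.g. on compute_sum_size(-2, True, 2, -1, 3): A returns 4, B returns 4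
import Mathlib
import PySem

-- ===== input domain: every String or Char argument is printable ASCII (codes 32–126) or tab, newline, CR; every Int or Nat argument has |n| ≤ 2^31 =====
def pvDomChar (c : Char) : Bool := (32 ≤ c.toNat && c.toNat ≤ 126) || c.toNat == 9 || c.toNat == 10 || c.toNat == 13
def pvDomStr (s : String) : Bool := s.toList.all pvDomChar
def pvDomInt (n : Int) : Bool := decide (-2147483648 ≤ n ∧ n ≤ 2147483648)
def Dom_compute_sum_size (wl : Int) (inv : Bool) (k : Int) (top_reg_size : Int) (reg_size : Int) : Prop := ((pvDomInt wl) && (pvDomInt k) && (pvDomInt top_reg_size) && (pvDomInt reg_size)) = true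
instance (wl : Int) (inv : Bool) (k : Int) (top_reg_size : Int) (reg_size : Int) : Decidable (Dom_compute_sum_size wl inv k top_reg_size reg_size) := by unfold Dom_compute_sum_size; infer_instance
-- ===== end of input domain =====

-- B evaluates the weighted sum by a Horner scheme with a parity swap (state (p,q) -> (v + a*q, a*p)
-- over the register values in decreasing weight order), so no power a^i, coefficient list, reversal,
-- zip or filtered pass of A remains (objective: faster — one multiplication per step instead of a
-- fresh exponentiation per position; measurably faster in a timing run).


-- ===== PORT A =====
-- Python's int.bit_length; exact: 0 for n = 0, floor(log2 |n|) + 1 otherwise.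
def pvBitLength (n : Int) : Nat := if n = 0 then 0 else Nat.log2 n.natAbs + 1

def compute_sum_size (wl : Int) (inv : Bool) (k : Int) (top_reg_size : Int) (reg_size : Int) : Int :=
  let coeffs0 : List Int := (PySem.List.pyRange 0 k 1).map (fun i => |wl| ^ i.toNat)
  let coeffs : List Int := if inv then coeffs0.reverse else coeffs0
  let reg_values : List Int :=
    List.replicate (k - 1).toNat (2 ^ reg_size.toNat - 1) ++ [2 ^ top_reg_size.toNat - 1]
  let max_val : Int :=
    if wl < 0 then
      max
        (((PySem.List.enumerate (coeffs.zip reg_values) 0).filter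
            (fun p => PySem.Int.mod p.1 2 == 0)).foldl (fun s p => s + p.2.1 * p.2.2) 0)
        (((PySem.List.enumerate (coeffs.zip reg_values) 0).filter
            (fun p => PySem.Int.mod p.1 2 == 1)).foldl (fun s p => s + p.2.1 * p.2.2) 0)
    else
      (coeffs.zip reg_values).foldl (fun s p => s + p.1 * p.2) 0
  (pvBitLength max_val : Int)

-- ===== PORT B =====
def compute_sum_size_alt (wl : Int) (inv : Bool) (k : Int) (top_reg_size : Int) (reg_size : Int) : Int :=
  if k ≤ 0 then 0 else
  let a := |wl|
  let R : Int := 2 ^ reg_size.toNat - 1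
  let T : Int := 2 ^ top_reg_size.toNat - 1
  let vals : List Int :=
    if inv then T :: List.replicate (k - 1).toNat R else List.replicate (k - 1).toNat R ++ [T]
  let pq : Int × Int :=
    vals.reverse.foldl (fun (s : Int × Int) v => (v + a * s.2, a * s.1)) (0, 0)
  let max_val : Int := if wl < 0 then max pq.1 pq.2 else pq.1 + pq.2
  (pvBitLength max_val : Int)

-- ===== PRECONDITION & SPEC =====
-- Pre_ excludes negative register sizes that are actually used (top_reg_size < 0 with k ≥ 1, reg_size < 0
-- with k ≥ 2): there Python's 2**size is a FLOAT, so both programs usually raise AttributeError on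
-- float.bit_length, and on the rare inputs where they do return, the value is computed through float
-- arithmetic, which the Int ports cannot represent.
def Pre_compute_sum_size (wl : Int) (inv : Bool) (k : Int) (top_reg_size : Int) (reg_size : Int) : Prop :=
  (1 ≤ k → 0 ≤ top_reg_size) ∧ (2 ≤ k → 0 ≤ reg_size)
instance (wl : Int) (inv : Bool) (k : Int) (top_reg_size : Int) (reg_size : Int) : Decidable (Pre_compute_sum_size wl inv k top_reg_size reg_size) := by unfold Pre_compute_sum_size; infer_instance
def pvWitness_compute_sum_size : Int × Bool × Int × Int × Int := (-3, true, 3, 4, 2)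

def Spec_compute_sum_size (wl : Int) (inv : Bool) (k : Int) (top_reg_size : Int) (reg_size : Int) (out : Int) : Prop := out = compute_sum_size_alt wl inv k top_reg_size reg_size
instance (wl : Int) (inv : Bool) (k : Int) (top_reg_size : Int) (reg_size : Int) (out : Int) : Decidable (Spec_compute_sum_size wl inv k top_reg_size reg_size out) := by unfold Spec_compute_sum_size; infer_instance

-- ===== CLAIM (what is proved, stated in full; the proofs are below) =====
def Claim_equal_compute_sum_size : Prop := ∀ (wl : Int) (inv : Bool) (k : Int) (top_reg_size : Int) (reg_size : Int), Dom_compute_sum_size wl inv k top_reg_size reg_size → Pre_compute_sum_size wl inv k top_reg_size reg_size → Spec_compute_sum_size wl inv k top_reg_size reg_size (compute_sum_size wl inv k top_reg_size reg_size)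

-- ===== LEMMAS AND PROOFS =====

-- the summand contributed at register position i (top register at position n-1; the coefficient on
-- position i is |wl|^(n-1-i) when inv, |wl|^i otherwise)
def pvTerm (a T R : Int) (inv : Bool) (n i : ℕ) : Int :=
  (if inv then a ^ (n - 1 - i) else a ^ i) * (if i = n - 1 then T else R)

-- parity-filtered reference sum in A's shape: filter by the parity of the POSITION
def pvSumA (a T R : Int) (inv : Bool) (n par : ℕ) : Int :=
  ∑ i ∈ Finset.range n, if i % 2 = par then pvTerm a T R inv n i else 0

-- the two parity sums of B's Horner pass: weight a^j on the j-th element of the value list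
def pvHsum (a : Int) (l : List Int) (par : ℕ) : Int :=
  ∑ j ∈ Finset.range l.length, if j % 2 = par then a ^ j * l.getD j 0 else 0

theorem pv_enum_map_range {α : Type} (g : ℕ → α) (n : ℕ) :
    PySem.List.enumerate ((List.range n).map g) 0 =
      (List.range n).map (fun i : ℕ => ((i : Int), g i)) := by
  apply List.ext_getElem
  · simp [PySem.List.length_enumerate]
  · intro i h1 h2
    simp [PySem.List.getElem_enumerate]

-- the zipped coefficient/register list of A is a map over positions
theorem pv_zip (a T R : Int) (inv : Bool) (n : ℕ) (hn : 1 ≤ n) :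
    ((if inv then ((List.range n).map (fun i => a ^ i)).reverse
      else (List.range n).map (fun i => a ^ i)).zip
      (List.replicate (n - 1) R ++ [T])) =
    (List.range n).map (fun i =>
      ((if inv then a ^ (n - 1 - i) else a ^ i), if i = n - 1 then T else R)) := by
  apply List.ext_getElem
  · cases inv <;> simp <;> omega
  · intro i h1 h2
    have hi : i < n := by simpa using h2
    have hlen : (List.replicate (n - 1) R ++ [T]).length = n := by simp; omega
    have hreg : (List.replicate (n - 1) R ++ [T])[i]'(by omega) = if i = n - 1 then T else R := by
      by_cases h : i < n - 1
      · rw [List.getElem_append_left (by simpa using h)]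
        simp [List.getElem_replicate]
        omega
      · have : i = n - 1 := by omega
        subst this
        rw [List.getElem_append_right (by simp)]
        simp
    cases inv <;> simp_all [List.getElem_zip, List.getElem_reverse]

theorem sum_filter_range (f : ℕ → Int) (p : ℕ → Bool) (n : ℕ) :
    (((List.range n).filter p).map f).sum = ∑ i ∈ Finset.range n, if p i then f i else 0 := by
  induction n with
  | zero => simp
  | succ n ih =>
    by_cases h : p n <;>
      simp [List.range_succ, List.filter_append, Finset.sum_range_succ, h, ih]

theorem sum_map_range (f : ℕ → Int) (n : ℕ) :
    ((List.range n).map f).sum = ∑ i ∈ Finset.range n, f i := by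
  induction n with
  | zero => simp
  | succ n ih => simp [List.range_succ, Finset.sum_range_succ, ih]

-- A's enumerate/filter/fold pass over a position-indexed list is a parity-guarded range sum
theorem pv_filtersum (g : ℕ → Int × Int) (n : ℕ) (c : Int) :
    (((List.range n).map (fun i : ℕ => ((i : Int), g i))).filter
        (fun p => PySem.Int.mod p.1 2 == c)).foldl (fun s p => s + p.2.1 * p.2.2) 0 =
    ∑ i ∈ Finset.range n, if ((i % 2 : ℕ) : Int) = c then (g i).1 * (g i).2 else 0 := by
  rw [List.filter_map, PySem.List.foldl_add, List.map_map]
  have hp : ((fun p : Int × (Int × Int) => PySem.Int.mod p.1 2 == c) ∘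
      (fun i : ℕ => ((i : Int), g i))) = fun i : ℕ => (((i % 2 : ℕ) : Int) == c) := by
    funext i
    simp
  rw [hp]
  have := sum_filter_range (fun i => (g i).1 * (g i).2)
    (fun i : ℕ => (((i % 2 : ℕ) : Int) == c)) n
  rw [show ((fun p : Int × Int × Int => p.2.1 * p.2.2) ∘ fun i : ℕ => ((i : Int), g i)) =
      fun i : ℕ => (g i).1 * (g i).2 from rfl]
  rw [this, zero_add]
  apply Finset.sum_congr rfl
  intro i _
  by_cases h : ((i % 2 : ℕ) : Int) = c <;> simp [h]

theorem pv_total (a T R : Int) (inv : Bool) (n : ℕ) :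
    pvSumA a T R inv n 0 + pvSumA a T R inv n 1 = ∑ i ∈ Finset.range n, pvTerm a T R inv n i := by
  rw [pvSumA, pvSumA, ← Finset.sum_add_distrib]
  apply Finset.sum_congr rfl
  intro i _
  by_cases h : i % 2 = 0
  · have h1 : ¬ i % 2 = 1 := by omega
    simp [h, h1]
  · have h1 : i % 2 = 1 := by omega
    simp [h1]

-- the parity-guarded range sum with an Int-cast condition is pvSumA
theorem pv_par_sum (a T R : Int) (inv : Bool) (n : ℕ) (c : Int) (par : ℕ)
    (hc : ∀ m : ℕ, ((m : Int) = c ↔ m = par)) :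
    (∑ i ∈ Finset.range n, if ((i % 2 : ℕ) : Int) = c then
        (if inv then a ^ (n - 1 - i) else a ^ i, if i = n - 1 then T else R).1 *
        (if inv then a ^ (n - 1 - i) else a ^ i, if i = n - 1 then T else R).2
      else 0) = pvSumA a T R inv n par := by
  rw [pvSumA]
  apply Finset.sum_congr rfl
  intro i _
  by_cases h : i % 2 = par
  · simp [h, pvTerm]
    exact fun hh => absurd ((hc par).mpr rfl) hh
  · have h2 : ¬ ((i % 2 : ℕ) : Int) = c := fun hh => h ((hc _).mp hh)
    simp [h]
    intro hh
    exact absurd (by push_cast; exact hh) h2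

-- characterisation of A for k ≥ 1
theorem pv_A_char (wl : Int) (inv : Bool) (k t r : Int) (hk : 1 ≤ k) :
    compute_sum_size wl inv k t r =
      ((pvBitLength
        (if wl < 0 then
          max (pvSumA |wl| (2 ^ t.toNat - 1) (2 ^ r.toNat - 1) inv k.toNat 0)
              (pvSumA |wl| (2 ^ t.toNat - 1) (2 ^ r.toNat - 1) inv k.toNat 1)
        else
          pvSumA |wl| (2 ^ t.toNat - 1) (2 ^ r.toNat - 1) inv k.toNat 0 +
          pvSumA |wl| (2 ^ t.toNat - 1) (2 ^ r.toNat - 1) inv k.toNat 1) : ℕ) : Int) := by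
  have hn : 1 ≤ k.toNat := by omega
  set n := k.toNat with hndef
  set a := |wl|
  set T := (2 ^ t.toNat - 1 : Int)
  set R := (2 ^ r.toNat - 1 : Int)
  have hrange : PySem.List.pyRange 0 k 1 = (List.range n).map (fun j : ℕ => (j : Int)) := by
    rw [PySem.List.pyRange_one]
    simp [hndef]
  have hc0 : ((PySem.List.pyRange 0 k 1).map (fun i : Int => a ^ i.toNat)) =
      (List.range n).map (fun i : ℕ => a ^ i) := by
    rw [hrange, List.map_map]
    apply List.map_congr_left
    intro i _
    simp
  have hk1 : (k - 1).toNat = n - 1 := by omega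
  unfold compute_sum_size
  dsimp only
  rw [hc0, hk1]
  rw [pv_zip a T R inv n hn]
  rw [pv_enum_map_range (fun i : ℕ =>
    ((if inv then a ^ (n - 1 - i) else a ^ i), if i = n - 1 then T else R)) n]
  by_cases hwl : wl < 0
  · simp only [hwl, if_true]
    rw [pv_filtersum, pv_filtersum,
      pv_par_sum a T R inv n 0 0 (by intro m; omega),
      pv_par_sum a T R inv n 1 1 (by intro m; omega)]
  · simp only [hwl, if_false]
    rw [PySem.List.foldl_add, List.map_map, sum_map_range, zero_add, pv_total]
    rfl

-- B's Horner pass computes the two weight-parity sums of the value list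
theorem pv_horner (a : Int) (l : List Int) :
    l.foldr (fun v (s : Int × Int) => (v + a * s.2, a * s.1)) (0, 0) =
      (pvHsum a l 0, pvHsum a l 1) := by
  induction l with
  | nil => simp [pvHsum]
  | cons w t ih =>
    rw [List.foldr_cons, ih]
    have h0 : pvHsum a (w :: t) 0 = w + a * pvHsum a t 1 := by
      rw [pvHsum, List.length_cons, Finset.sum_range_succ']
      simp only [List.getD_cons_succ, List.getD_cons_zero, pow_zero, Nat.zero_mod]
      rw [pvHsum, Finset.mul_sum]
      have : ∀ i ∈ Finset.range t.length,
          (if (i + 1) % 2 = 0 then a ^ (i + 1) * t.getD i 0 else 0) =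
          a * (if i % 2 = 1 then a ^ i * t.getD i 0 else 0) := by
        intro i _
        by_cases h : i % 2 = 1
        · have : (i + 1) % 2 = 0 := by omega
          simp [h, this, pow_succ]
          ring
        · have : ¬ (i + 1) % 2 = 0 := by omega
          simp [h, this]
      rw [Finset.sum_congr rfl this]
      simp [add_comm]
    have h1 : pvHsum a (w :: t) 1 = a * pvHsum a t 0 := by
      rw [pvHsum, List.length_cons, Finset.sum_range_succ']
      simp only [List.getD_cons_succ, List.getD_cons_zero, pow_zero, Nat.zero_mod]
      rw [pvHsum, Finset.mul_sum]
      have : ∀ i ∈ Finset.range t.length,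
          (if (i + 1) % 2 = 1 then a ^ (i + 1) * t.getD i 0 else 0) =
          a * (if i % 2 = 0 then a ^ i * t.getD i 0 else 0) := by
        intro i _
        by_cases h : i % 2 = 0
        · have : (i + 1) % 2 = 1 := by omega
          simp [h, this, pow_succ]
          ring
        · have : ¬ (i + 1) % 2 = 1 := by omega
          simp [h, this]
      rw [Finset.sum_congr rfl this]
      simp
    rw [h0, h1]

-- value lists, element-wise
theorem pv_getD_app (R T : Int) (n j : ℕ) (hn : 1 ≤ n) (hj : j < n) :
    (List.replicate (n - 1) R ++ [T]).getD j 0 = if j = n - 1 then T else R := by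
  have hlen : (List.replicate (n - 1) R ++ [T]).length = n := by simp; omega
  rw [List.getD_eq_getElem _ _ (by omega)]
  by_cases h : j < n - 1
  · rw [List.getElem_append_left (by simpa using h)]
    simp [List.getElem_replicate]
    omega
  · have : j = n - 1 := by omega
    subst this
    rw [List.getElem_append_right (by simp)]
    simp

theorem pv_getD_cons (R T : Int) (n j : ℕ) (hj : j < n) :
    (T :: List.replicate (n - 1) R).getD j 0 = if j = 0 then T else R := by
  cases j with
  | zero => simp
  | succ j =>
    simp only [List.getD_cons_succ]
    rw [List.getD_eq_getElem _ _ (by simp; omega)]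
    simp [List.getElem_replicate]

-- non-inverted: B's parity sums are A's parity sums directly
theorem pv_H_noninv (a T R : Int) (n par : ℕ) (hn : 1 ≤ n) :
    pvHsum a (List.replicate (n - 1) R ++ [T]) par = pvSumA a T R false n par := by
  rw [pvHsum, pvSumA]
  have hlen : (List.replicate (n - 1) R ++ [T]).length = n := by simp; omega
  rw [hlen]
  apply Finset.sum_congr rfl
  intro j hj
  rw [pv_getD_app R T n j hn (Finset.mem_range.mp hj)]
  simp [pvTerm]

-- inverted: A's position-parity sum is B's weight-parity sum with the parity shifted by n-1
theorem pv_H_inv (a T R : Int) (n par : ℕ) (hn : 1 ≤ n) (hpar : par < 2) :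
    pvSumA a T R true n par = pvHsum a (T :: List.replicate (n - 1) R) ((n - 1 + par) % 2) := by
  rw [pvHsum, pvSumA]
  have hlen : (T :: List.replicate (n - 1) R).length = n := by simp; omega
  rw [hlen, ← Finset.sum_range_reflect
    (fun i => if i % 2 = par then pvTerm a T R true n i else 0) n]
  apply Finset.sum_congr rfl
  intro j hj
  have hj' : j < n := Finset.mem_range.mp hj
  rw [pv_getD_cons R T n j hj']
  have h1 : n - 1 - (n - 1 - j) = j := by omega
  have h2 : (n - 1 - j = n - 1) ↔ (j = 0) := by omega
  have h3 : ((n - 1 - j) % 2 = par) ↔ (j % 2 = (n - 1 + par) % 2) := by omega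
  simp only [pvTerm, h1]
  by_cases hc : j % 2 = (n - 1 + par) % 2
  · rw [if_pos (h3.mpr hc), if_pos hc]
    by_cases h0 : j = 0 <;> simp [h0, h2]
  · rw [if_neg (fun hh => hc (h3.mp hh)), if_neg hc]

-- characterisation of B for k ≥ 1
theorem pv_B_char (wl : Int) (inv : Bool) (k t r : Int) (hk : 1 ≤ k) :
    compute_sum_size_alt wl inv k t r =
      ((pvBitLength
        (if wl < 0 then
          max (pvSumA |wl| (2 ^ t.toNat - 1) (2 ^ r.toNat - 1) inv k.toNat 0)
              (pvSumA |wl| (2 ^ t.toNat - 1) (2 ^ r.toNat - 1) inv k.toNat 1)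
        else
          pvSumA |wl| (2 ^ t.toNat - 1) (2 ^ r.toNat - 1) inv k.toNat 0 +
          pvSumA |wl| (2 ^ t.toNat - 1) (2 ^ r.toNat - 1) inv k.toNat 1) : ℕ) : Int) := by
  have hn : 1 ≤ k.toNat := by omega
  have hk1 : (k - 1).toNat = k.toNat - 1 := by omega
  unfold compute_sum_size_alt
  rw [if_neg (by omega)]
  dsimp only
  rw [hk1, List.foldl_reverse, pv_horner]
  set n := k.toNat with hndef
  set a := |wl|
  set T := (2 ^ t.toNat - 1 : Int)
  set R := (2 ^ r.toNat - 1 : Int)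
  cases inv
  · simp only [Bool.false_eq_true, if_false]
    rw [pv_H_noninv a T R n 0 hn, pv_H_noninv a T R n 1 hn]
  · simp only [eq_self_iff_true, if_true]
    have e0 := pv_H_inv a T R n 0 hn (by omega)
    have e1 := pv_H_inv a T R n 1 hn (by omega)
    by_cases hpar : n % 2 = 1
    · have p0 : (n - 1 + 0) % 2 = 0 := by omega
      have p1 : (n - 1 + 1) % 2 = 1 := by omega
      rw [p0] at e0; rw [p1] at e1
      rw [← e0, ← e1]
    · have p0 : (n - 1 + 0) % 2 = 1 := by omega
      have p1 : (n - 1 + 1) % 2 = 0 := by omega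
      rw [p0] at e0; rw [p1] at e1
      rw [← e0, ← e1]
      by_cases hwl : wl < 0
      · simp only [hwl, if_true, max_comm]
      · simp only [hwl, if_false, add_comm]

-- ===== VERDICT (by name: the statement is the Claim_ definition above) =====
theorem compute_sum_size_spec : Claim_equal_compute_sum_size := by
  intro wl inv k t r _ _
  unfold Spec_compute_sum_size
  by_cases hk : 1 ≤ k
  · rw [pv_A_char wl inv k t r hk, pv_B_char wl inv k t r hk]
  · have hnil : PySem.List.pyRange 0 k 1 = [] := PySem.List.pyRange_one_eq_nil (by omega)
    unfold compute_sum_size compute_sum_size_alt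
    rw [hnil, if_pos (by omega)]
    simp [pvBitLength]
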